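-- pv_equiv track=rewrite | github.com/Schmiemandev/inkwell-data | scripts/generate_leaderboard.py | generate_leaderboard
-- ===== SOURCE A (Python) =====
-- from collections import Counter
--
-- def generate_leaderboard(inks_data):
--     """Generates a top 10 leaderboard from the inks data."""
--     if not inks_data:
--         return "No ink data available to generate leaderboard."
--
--     credits = []
--     for ink in inks_data:
--         credit = ink.get("credit")
--         if credit and isinstance(credit, str):
--             credits.append(credit.strip())
--
--     if not credits:
--         return "No credit information found in inks data."
--
--     credit_counts = Counter(credits)
--     top_10 = credit_counts.most_common(10)
--
--     leaderboard_markdown = "### Top 10 Contributors\n\n"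
--     leaderboard_markdown += "| Rank | Contributor | Inks Added |\n"
--     leaderboard_markdown += "|---|---|---|\n"
--     for i, (contributor, count) in enumerate(top_10):
--         leaderboard_markdown += f"| {i + 1} | {contributor} | {count} |\n"
--
--     return leaderboard_markdown
-- ===== SOURCE B (Python) =====
-- def generate_leaderboard(inks_data):
--     """Generates a top 10 leaderboard from the inks data."""
--     if not inks_data:
--         return "No ink data available to generate leaderboard."
--
--     counts = {}
--     for ink in inks_data:
--         credit = ink.get("credit")
--         if credit and isinstance(credit, str):
--             name = credit.strip()
--             counts[name] = counts.get(name, 0) + 1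
--
--     if not counts:
--         return "No credit information found in inks data."
--
--     lines = ["### Top 10 Contributors", "",
--              "| Rank | Contributor | Inks Added |", "|---|---|---|"]
--     remaining = list(counts.items())
--     rank = 0
--     while remaining and rank < 10:
--         best_i, best = 0, remaining[0]
--         for j, item in enumerate(remaining):
--             if item[1] > best[1]:
--                 best_i, best = j, item
--         remaining.pop(best_i)
--         rank += 1
--         lines.append("| %d | %s | %d |" % (rank, best[0], best[1]))
--     return "\n".join(lines) + "\n"
-- ===== Notes on version B (the rewrite author's own statement) =====
-- stated objective: alternative
-- what changed: Replaces the Counter pipeline (collect a credits list, Counter it, heap-based most_common(10)) by one-pass counting into a plain insertion-ordered dict followed by selection: a while loop that linearly scans the remaining entries for the first maximal count, pops it and emits its row, at most ten times - no sort and no heap; rows are collected in a list joined once at the end.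
import Mathlib
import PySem

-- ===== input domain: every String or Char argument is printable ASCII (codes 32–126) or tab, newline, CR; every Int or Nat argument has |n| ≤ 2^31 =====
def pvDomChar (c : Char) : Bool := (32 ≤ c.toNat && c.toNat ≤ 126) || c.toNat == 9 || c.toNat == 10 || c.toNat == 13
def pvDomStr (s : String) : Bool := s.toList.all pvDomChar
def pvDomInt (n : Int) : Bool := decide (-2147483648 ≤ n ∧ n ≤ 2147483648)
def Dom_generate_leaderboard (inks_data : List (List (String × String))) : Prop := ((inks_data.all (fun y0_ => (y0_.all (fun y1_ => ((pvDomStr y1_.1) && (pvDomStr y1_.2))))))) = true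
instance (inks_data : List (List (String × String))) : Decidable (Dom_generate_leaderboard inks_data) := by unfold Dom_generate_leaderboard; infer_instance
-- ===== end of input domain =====

-- B replaces the Counter + heap-based most_common(10) pipeline by selection: it counts into a plain
-- dict in one pass and then extracts the top 10 by repeated linear scans for the first maximum,
-- popping each winner; no sort or heap at all, rows collected in a list joined at the end.

-- ===== PORT A =====
-- Under the type convention every value is a String, so `isinstance(credit, str)` is always true;
-- `credit and …` is the non-empty-string test.  `Counter(credits)` is PySem.Dict.counter; CPython
-- documents `most_common(n)` as `sorted(c.items(), key=itemgetter(1), reverse=True)[:n]` (heapq.nlargest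
-- is specified to be equivalent to that, including stability), which is how it is ported.
def generate_leaderboard (inks_data : List (List (String × String))) : String :=
  if inks_data = [] then "No ink data available to generate leaderboard."
  else
    let credits : List String := inks_data.foldl (fun acc ink =>
      match (PySem.Dict.mk ink).get? "credit" with
      | some credit => if credit ≠ "" then acc ++ [PySem.Str.strip credit] else acc
      | none => acc) []
    if credits = [] then "No credit information found in inks data."
    else
      let credit_counts := PySem.Dict.counter credits
      let top_10 := (PySem.List.sorted credit_counts.items (fun kv => kv.2) true).take 10
      let s0 := "### Top 10 Contributors\n\n" ++ "| Rank | Contributor | Inks Added |\n" ++ "|---|---|---|\n"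
      (PySem.List.enumerate top_10).foldl (fun s p =>
        s ++ "| " ++ PySem.Int.toStr (p.1 + 1) ++ " | " ++ p.2.1 ++ " | " ++ PySem.Int.toStr p.2.2 ++ " |\n") s0

-- ===== PORT B =====
-- two termination helpers for the while-loop port (cited in its decreasing-by proof):
-- the inner for-loop's best is either the initial (0, r) or one of the enumerated pairs ...
theorem pv_foldl_choice (ps : List (Int × (String × Int))) (b : Int × (String × Int)) :
    ps.foldl (fun b p => if p.2.2 > b.2.2 then p else b) b = b ∨
      ps.foldl (fun b p => if p.2.2 > b.2.2 then p else b) b ∈ ps := by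
  induction ps generalizing b with
  | nil => left; rfl
  | cons p ps ih =>
      rcases ih (if p.2.2 > b.2.2 then p else b) with h | h
      · rw [List.foldl_cons, h]
        by_cases hc : p.2.2 > b.2.2
        · right; simp [hc]
        · left; simp [hc]
      · right; exact List.mem_cons_of_mem _ h

-- ... and every enumerated index is in [s, s + len)
theorem pv_mem_enumerate (l : List (String × Int)) (s : Int) (q : Int × (String × Int))
    (h : q ∈ PySem.List.enumerate l s) : s ≤ q.1 ∧ q.1 < s + l.length := by
  induction l generalizing s with
  | nil => simp [PySem.List.enumerate] at h
  | cons x t ih =>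
      rw [PySem.List.enumerate_cons] at h
      rcases List.mem_cons.mp h with h | h
      · subst h; simp
      · have := ih (s + 1) h
        simp only [List.length_cons]
        push_cast
        omega

-- the while loop: scan remaining for the first maximal count, pop it, emit a row; at most 10 rows
def pvSelLoop (remaining : List (String × Int)) (rank : Int) (lines : List String) : List String :=
  match remaining with
  | [] => lines
  | r :: rs =>
    if rank < 10 then
      let b := (PySem.List.enumerate (r :: rs)).foldl (fun b p => if p.2.2 > b.2.2 then p else b) (0, r)
      pvSelLoop ((r :: rs).eraseIdx b.1.toNat) (rank + 1)
        (lines ++ ["| " ++ PySem.Int.toStr (rank + 1) ++ " | " ++ b.2.1 ++ " | " ++ PySem.Int.toStr b.2.2 ++ " |"])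
    else lines
termination_by remaining.length
decreasing_by
  simp only [dite_eq_ite]
  have hlt : (((PySem.List.enumerate (r :: rs)).foldl (fun b p => if p.2.2 > b.2.2 then p else b) (0, r)).1).toNat < (r :: rs).length := by
    rcases pv_foldl_choice (PySem.List.enumerate (r :: rs)) (0, r) with h | h
    · rw [h]; simp
    · have hb := pv_mem_enumerate (r :: rs) 0 _ h
      omega
  rw [List.length_eraseIdx, if_pos hlt]
  simp only [List.length_cons]
  omega

def generate_leaderboard_alt (inks_data : List (List (String × String))) : String :=
  if inks_data = [] then "No ink data available to generate leaderboard."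
  else
    let counts : PySem.Dict String Int := inks_data.foldl (fun d ink =>
      match (PySem.Dict.mk ink).get? "credit" with
      | some credit =>
          if credit ≠ "" then
            let name := PySem.Str.strip credit
            d.insert name (d.getD name 0 + 1)
          else d
      | none => d) PySem.Dict.empty
    if counts.items = [] then "No credit information found in inks data."
    else
      let lines0 : List String := ["### Top 10 Contributors", "",
        "| Rank | Contributor | Inks Added |", "|---|---|---|"]
      PySem.Str.join "\n" (pvSelLoop counts.items 0 lines0) ++ "\n"

-- ===== PRECONDITION & SPEC =====
def Spec_generate_leaderboard (inks_data : List (List (String × String))) (out : String) : Prop := out = generate_leaderboard_alt inks_data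
instance (inks_data : List (List (String × String))) (out : String) : Decidable (Spec_generate_leaderboard inks_data out) := by unfold Spec_generate_leaderboard; infer_instance

-- ===== CLAIM (what is proved, stated in full; the proofs are below) =====
def Claim_equal_generate_leaderboard : Prop := ∀ (inks_data : List (List (String × String))), Dom_generate_leaderboard inks_data → Spec_generate_leaderboard inks_data (generate_leaderboard inks_data)

-- ===== LEMMAS AND PROOFS =====

-- the optional credit contributed by one ink record
def pvCreditOf (ink : List (String × String)) : List String :=
  match (PySem.Dict.mk ink).get? "credit" with
  | some credit => if credit ≠ "" then [PySem.Str.strip credit] else []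
  | none => []

theorem pv_credits_eq (inks : List (List (String × String))) (acc : List String) :
    inks.foldl (fun acc ink =>
      match (PySem.Dict.mk ink).get? "credit" with
      | some credit => if credit ≠ "" then acc ++ [PySem.Str.strip credit] else acc
      | none => acc) acc = acc ++ inks.flatMap pvCreditOf := by
  rw [← PySem.List.foldl_append_eq_flatMap pvCreditOf]
  apply PySem.List.foldl_congr_mem
  intro a x _
  unfold pvCreditOf
  cases (PySem.Dict.mk x).get? "credit" with
  | none => simp
  | some c => by_cases h : c = "" <;> simp [h]

theorem pv_counts_eq (inks : List (List (String × String))) (d : PySem.Dict String Int) :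
    inks.foldl (fun d ink =>
      match (PySem.Dict.mk ink).get? "credit" with
      | some credit =>
          if credit ≠ "" then
            let name := PySem.Str.strip credit
            d.insert name (d.getD name 0 + 1)
          else d
      | none => d) d
    = (inks.flatMap pvCreditOf).foldl (fun d x => d.insert x (d.getD x 0 + 1)) d := by
  induction inks generalizing d with
  | nil => simp
  | cons x xs ih =>
      simp only [List.foldl_cons, List.flatMap_cons, List.foldl_append, ih]
      congr 1
      unfold pvCreditOf
      cases (PySem.Dict.mk x).get? "credit" with
      | none => simp
      | some c => by_cases h : c = "" <;> simp [h]

theorem pv_ofList_eq_nil_iff {α : Type} [BEq α] [LawfulBEq α] (xs : List α) :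
    PySem.Set.ofList xs = [] ↔ xs = [] := by
  constructor
  · intro h
    cases xs with
    | nil => rfl
    | cons y ys =>
        have hm : y ∈ PySem.Set.ofList (y :: ys) := (PySem.Set.mem_ofList _ _).mpr (List.mem_cons_self)
        rw [h] at hm; cases hm
  · intro h; subst h; rfl

-- ---- stable descending insertion sort, head-extraction form ----

-- insert BEFORE equals (the element being inserted is older than the list's elements)
def pvIns (x : String × Int) : List (String × Int) → List (String × Int)
  | [] => [x]
  | y :: ys => if y.2 ≤ x.2 then x :: y :: ys else y :: pvIns x ys

def pvISort : List (String × Int) → List (String × Int)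
  | [] => []
  | x :: t => pvIns x (pvISort t)

-- index and value of the FIRST maximal element of x :: t
def pvFM (x : String × Int) : List (String × Int) → Nat × (String × Int)
  | [] => (0, x)
  | y :: t => if (pvFM y t).2.2 > x.2 then ((pvFM y t).1 + 1, (pvFM y t).2) else (0, x)

theorem pv_comm (acc : List (String × Int)) (z x : String × Int) :
    PySem.List.insertBy (fun a b => decide (b.2 < a.2)) z (pvIns x acc)
      = pvIns x (PySem.List.insertBy (fun a b => decide (b.2 < a.2)) z acc) := by
  induction acc with
  | nil =>
      simp only [pvIns, PySem.List.insertBy]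
      by_cases h : x.2 < z.2
      · simp [h, not_le.mpr h]
      · simp [h, not_lt.mp h]
  | cons y ys ih =>
      simp only [pvIns]
      by_cases h1 : y.2 ≤ x.2
      · rw [if_pos h1]
        by_cases h2 : x.2 < z.2
        · have h3 : y.2 < z.2 := lt_of_le_of_lt h1 h2
          simp only [PySem.List.insertBy, decide_eq_true_eq, if_pos h2, if_pos h3]
          simp [pvIns, h1, not_le.mpr h2]
        · by_cases h4 : y.2 < z.2
          · simp only [PySem.List.insertBy, decide_eq_true_eq, if_neg h2, if_pos h4]
            simp [pvIns, not_lt.mp h2]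
          · simp only [PySem.List.insertBy, decide_eq_true_eq, if_neg h2, if_neg h4]
            simp [pvIns, h1]
      · rw [if_neg h1]
        by_cases h4 : y.2 < z.2
        · simp only [PySem.List.insertBy, decide_eq_true_eq, if_pos h4]
          have h2 : x.2 < z.2 := lt_trans (not_le.mp h1) h4
          simp [pvIns, not_le.mpr h2, h1]
        · simp only [PySem.List.insertBy, decide_eq_true_eq, if_neg h4]
          simp [pvIns, h1, ih]

theorem pv_foldl_ins (t : List (String × Int)) (acc : List (String × Int)) (x : String × Int) :
    t.foldl (fun a z => PySem.List.insertBy (fun a b => decide (b.2 < a.2)) z a) (pvIns x acc)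
      = pvIns x (t.foldl (fun a z => PySem.List.insertBy (fun a b => decide (b.2 < a.2)) z a) acc) := by
  induction t generalizing acc with
  | nil => rfl
  | cons z t ih => simp only [List.foldl_cons, pv_comm, ih]

theorem pv_sorted_eq_isort (l : List (String × Int)) :
    PySem.List.sorted l (fun kv => kv.2) true = pvISort l := by
  induction l with
  | nil => rfl
  | cons x t ih =>
      rw [PySem.List.sorted_rev_eq_foldl_insertBy] at ih ⊢
      rw [List.foldl_cons]
      have : PySem.List.insertBy (fun a b => decide ((fun kv : String × Int => kv.2) b < (fun kv : String × Int => kv.2) a)) x [] = pvIns x [] := rfl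
      rw [this, pv_foldl_ins, ih]
      rfl

theorem pv_fm_lt (x : String × Int) (t : List (String × Int)) :
    (pvFM x t).1 < (x :: t).length := by
  induction t generalizing x with
  | nil => simp [pvFM]
  | cons y t ih =>
      simp only [pvFM]
      split
      · have := ih y; simpa using Nat.succ_lt_succ this
      · simp

theorem pv_fm_extract (t : List (String × Int)) (x : String × Int) :
    pvISort (x :: t) = (pvFM x t).2 :: pvISort ((x :: t).eraseIdx (pvFM x t).1) := by
  induction t generalizing x with
  | nil => simp [pvISort, pvFM, pvIns]
  | cons y t ih =>
      simp only [pvFM]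
      by_cases h : (pvFM y t).2.2 > x.2
      · rw [if_pos h]
        show pvIns x (pvISort (y :: t)) = _
        rw [ih y]
        rw [show pvIns x ((pvFM y t).2 :: pvISort ((y :: t).eraseIdx (pvFM y t).1))
              = (pvFM y t).2 :: pvIns x (pvISort ((y :: t).eraseIdx (pvFM y t).1)) from by
          simp [pvIns, not_le.mpr h]]
        rfl
      · rw [if_neg h]
        show pvIns x (pvISort (y :: t)) = x :: pvISort (y :: t)
        rw [ih y]
        simp [pvIns, not_lt.mp (by simpa using h)]

theorem pv_runmax (t : List (String × Int)) (y : String × Int) (b : Int × (String × Int)) (s : Int) :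
    (PySem.List.enumerate (y :: t) s).foldl (fun b p => if p.2.2 > b.2.2 then p else b) b
      = if (pvFM y t).2.2 > b.2.2 then (s + (pvFM y t).1, (pvFM y t).2) else b := by
  induction t generalizing y b s with
  | nil =>
      simp only [PySem.List.enumerate, List.foldl_cons, List.foldl_nil, pvFM]
      split <;> simp
  | cons z u ih =>
      rw [PySem.List.enumerate_cons, List.foldl_cons, ih z _ (s + 1)]
      simp only [pvFM]
      by_cases h1 : (pvFM z u).2.2 > y.2
      · rw [if_pos h1]
        by_cases h2 : y.2 > b.2.2
        · rw [if_pos h2, if_pos (by simp; omega), if_pos (by simp; omega)]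
          simp [Prod.ext_iff]; push_cast; ring
        · rw [if_neg h2]
          by_cases h3 : (pvFM z u).2.2 > b.2.2
          · rw [if_pos h3, if_pos (by simpa using h3)]
            simp [Prod.ext_iff]; push_cast; ring
          · rw [if_neg h3, if_neg (by simpa using h3)]
      · rw [if_neg h1]
        by_cases h2 : y.2 > b.2.2
        · rw [if_pos h2, if_neg (by simp; omega), if_pos (by simpa using h2)]
          simp
        · rw [if_neg h2]
          by_cases h3 : (pvFM z u).2.2 > b.2.2
          · exact absurd (by omega : (pvFM z u).2.2 > y.2) h1
          · rw [if_neg h3, if_neg (by simpa using h2)]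

theorem pv_fm_self (x : String × Int) (t : List (String × Int))
    (h : ¬ (pvFM x t).2.2 > x.2) : pvFM x t = (0, x) := by
  cases t with
  | nil => rfl
  | cons y u =>
      by_cases hc : (pvFM y u).2.2 > x.2
      · exfalso
        simp only [pvFM, if_pos hc] at h
        exact h hc
      · simp [pvFM, hc]

theorem pv_best_fm (r : String × Int) (rs : List (String × Int)) :
    (PySem.List.enumerate (r :: rs)).foldl (fun b p => if p.2.2 > b.2.2 then p else b) (0, r)
      = (((pvFM r rs).1 : Int), (pvFM r rs).2) := by
  rw [show PySem.List.enumerate (r :: rs) = PySem.List.enumerate (r :: rs) 0 from rfl]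
  rw [pv_runmax rs r (0, r) 0]
  by_cases h : (pvFM r rs).2.2 > r.2
  · rw [if_pos h]; simp
  · rw [if_neg h, pv_fm_self r rs h]; simp

def pvRow (p : Int × (String × Int)) : String :=
  "| " ++ PySem.Int.toStr p.1 ++ " | " ++ p.2.1 ++ " | " ++ PySem.Int.toStr p.2.2 ++ " |"

theorem pv_loop_eq (n : Nat) : ∀ (l : List (String × Int)) (rank : Int) (lines : List String),
    l.length ≤ n → 0 ≤ rank →
    pvSelLoop l rank lines
      = lines ++ (PySem.List.enumerate ((pvISort l).take ((10 - rank).toNat)) (rank + 1)).map pvRow := by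
  induction n with
  | zero =>
      intro l rank lines hl _
      have : l = [] := List.length_eq_zero_iff.mp (Nat.le_zero.mp hl)
      subst this
      simp [pvSelLoop, pvISort, PySem.List.enumerate]
  | succ n ih =>
      intro l rank lines hl hr
      cases l with
      | nil => simp [pvSelLoop, pvISort, PySem.List.enumerate]
      | cons r rs =>
          by_cases h10 : rank < 10
          · rw [show pvSelLoop (r :: rs) rank lines
                  = pvSelLoop ((r :: rs).eraseIdx
                      (((PySem.List.enumerate (r :: rs)).foldl (fun b p => if p.2.2 > b.2.2 then p else b) (0, r)).1).toNat)
                      (rank + 1)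
                      (lines ++ ["| " ++ PySem.Int.toStr (rank + 1) ++ " | "
                        ++ ((PySem.List.enumerate (r :: rs)).foldl (fun b p => if p.2.2 > b.2.2 then p else b) (0, r)).2.1 ++ " | "
                        ++ PySem.Int.toStr ((PySem.List.enumerate (r :: rs)).foldl (fun b p => if p.2.2 > b.2.2 then p else b) (0, r)).2.2 ++ " |"])
                from by rw [pvSelLoop]; simp [h10]]
            rw [pv_best_fm, Int.toNat_natCast]
            have herase : ((r :: rs).eraseIdx (pvFM r rs).1).length ≤ n := by
              have hlt := pv_fm_lt r rs
              rw [List.length_eraseIdx, if_pos hlt]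
              simp only [List.length_cons] at hl ⊢
              omega
            rw [ih _ (rank + 1) _ herase (by omega)]
            rw [pv_fm_extract rs r]
            have htn : (10 - rank).toNat = (10 - (rank + 1)).toNat + 1 := by omega
            rw [htn, List.take_succ_cons, PySem.List.enumerate_cons, List.map_cons]
            simp [pvRow, List.append_assoc]
          · rw [show pvSelLoop (r :: rs) rank lines = lines from by rw [pvSelLoop]; simp [h10]]
            have : (10 - rank).toNat = 0 := by omega
            simp [this, PySem.List.enumerate]

theorem pv_join_cons₂ (sep a b : String) (rest : List String) :
    PySem.Str.join sep (a :: b :: rest) = a ++ sep ++ PySem.Str.join sep (b :: rest) := by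
  simp only [PySem.Str.join, List.map_cons, PySem.Chars.join_cons_cons]
  apply String.toList_inj.mp
  simp

theorem pv_fmt (l : List (String × Int)) (i : Int) (s : String) (hne : l ≠ []) :
    (PySem.List.enumerate l i).foldl (fun s p =>
        s ++ "| " ++ PySem.Int.toStr (p.1 + 1) ++ " | " ++ p.2.1 ++ " | " ++ PySem.Int.toStr p.2.2 ++ " |\n") s
    = s ++ PySem.Str.join "\n" ((PySem.List.enumerate l (i + 1)).map pvRow) ++ "\n" := by
  induction l generalizing i s with
  | nil => exact absurd rfl hne
  | cons x xs ih =>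
      cases xs with
      | nil =>
          apply String.toList_inj.mp
          simp [PySem.List.enumerate_cons, PySem.Str.join, PySem.Chars.join_singleton, pvRow,
            PySem.List.enumerate]
      | cons y ys =>
          rw [PySem.List.enumerate_cons, List.foldl_cons, ih (i + 1) _ (by simp)]
          rw [show PySem.List.enumerate (x :: y :: ys) (i + 1)
                = (i + 1, x) :: PySem.List.enumerate (y :: ys) (i + 1 + 1) from rfl]
          rw [show PySem.List.enumerate (y :: ys) (i + 1 + 1)
                = (i + 1 + 1, y) :: PySem.List.enumerate ys (i + 1 + 1 + 1) from rfl]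
          rw [List.map_cons, List.map_cons, List.map_cons, pv_join_cons₂]
          apply String.toList_inj.mp
          simp [pvRow]

-- ===== VERDICT (by name: the statement is the Claim_ definition above) =====
theorem generate_leaderboard_spec : Claim_equal_generate_leaderboard := by
  intro inks _
  unfold Spec_generate_leaderboard generate_leaderboard generate_leaderboard_alt
  by_cases h0 : inks = []
  · simp [h0]
  · simp only [if_neg h0]
    rw [pv_credits_eq, pv_counts_eq, PySem.Dict.foldl_insert_getD_add_one_eq_counter]
    simp only [List.nil_append]
    set cs := inks.flatMap pvCreditOf with hcs
    by_cases hc : cs = []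
    · rw [hc]
      simp [show (PySem.Dict.counter ([] : List String)).items = [] from rfl]
    · have hi : (PySem.Dict.counter cs).items ≠ [] := by
        rw [PySem.Dict.items_counter]
        intro h
        exact hc ((pv_ofList_eq_nil_iff cs).mp (List.map_eq_nil_iff.mp h))
      rw [if_neg hc, if_neg hi]
      have hAne : ((PySem.List.sorted (PySem.Dict.counter cs).items (fun kv => kv.2) true).take 10) ≠ [] := by
        simp only [ne_eq, List.take_eq_nil_iff]
        simp [PySem.List.sorted_eq_nil_iff, hi]
      rw [pv_fmt _ 0 _ hAne]
      rw [pv_loop_eq ((PySem.Dict.counter cs).items.length) _ 0 _ (le_refl _) (by omega)]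
      rw [pv_sorted_eq_isort]
      rw [show ((10 : Int) - 0).toNat = 10 from by decide]
      rw [pv_sorted_eq_isort] at hAne
      rcases List.exists_cons_of_ne_nil hAne with ⟨w, ws, hw⟩
      rw [hw, PySem.List.enumerate_cons, List.map_cons]
      simp only [List.cons_append, List.nil_append]
      rw [pv_join_cons₂, pv_join_cons₂, pv_join_cons₂, pv_join_cons₂]
      apply String.toList_inj.mp
      simp
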